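-- pv_equiv track=rewrite | github.com/blake27182/Rubiks-Cube-Solver | Transcriber.py | RealMovesOnly
-- ===== SOURCE A (Python) =====
-- import copy
--
-- def RealMovesOnly(history):
--     """Converts a relative move history to an absolute move history
--
--     When the history is initially written, each move is relative to the face
--         currently facing "forward". This function takes the cube rotations out
--         and re-writes the moves to be relative to one face.
--
--     Args:
--         history (:obj:`list` of str): History of moves
--
--     Returns:
--         (:obj:`list` of str): History of moves without cube rotations
--     """
--
--     # relative move : absolute move
--     dicXC = {'UC': 'FC', 'UCC': 'FCC', 'DC': 'BC',
--              'DCC': 'BCC', 'LC': 'LC', 'LCC': 'LCC',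
--              'RC': 'RC', 'RCC': 'RCC', 'FC': 'DC',
--              'FCC': 'DCC', 'BC': 'UC', 'BCC': 'UCC',
--              'XC': 'XC', 'XCC': 'XCC', 'YC': 'ZC',
--              'YCC': 'ZCC', 'ZC': 'YCC', 'ZCC': 'YC'
--              }
--
--     dicXCC = {'UC': 'BC', 'UCC': 'BCC', 'DC': 'FC',
--               'DCC': 'FCC', 'LC': 'LC', 'LCC': 'LCC',
--               'RC': 'RC', 'RCC': 'RCC', 'FC': 'UC',
--               'FCC': 'UCC', 'BC': 'DC', 'BCC': 'DCC',
--               'XC': 'XC', 'XCC': 'XCC', 'YC': 'ZCC',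
--               'YCC': 'ZC', 'ZC': 'YC', 'ZCC': 'YCC'
--               }
--
--     dicYC = {'UC': 'UC', 'UCC': 'UCC', 'DC': 'DC',
--              'DCC': 'DCC', 'LC': 'FC', 'LCC': 'FCC',
--              'RC': 'BC', 'RCC': 'BCC', 'FC': 'RC',
--              'FCC': 'RCC', 'BC': 'LC', 'BCC': 'LCC',
--              'XC': 'ZCC', 'XCC': 'ZC', 'YC': 'YC',
--              'YCC': 'YCC', 'ZC': 'XC', 'ZCC': 'XCC'
--              }
--
--     dicYCC = {'UC': 'UC', 'UCC': 'UCC', 'DC': 'DC',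
--               'DCC': 'DCC', 'LC': 'BC', 'LCC': 'BCC',
--               'RC': 'FC', 'RCC': 'FCC', 'FC': 'LC',
--               'FCC': 'LCC', 'BC': 'RC', 'BCC': 'RCC',
--               'XC': 'ZC', 'XCC': 'ZCC', 'YC': 'YC',
--               'YCC': 'YCC', 'ZC': 'XCC', 'ZCC': 'XC'
--               }
--
--     dicZC = {'UC': 'LC', 'UCC': 'LCC', 'DC': 'RC',
--              'DCC': 'RCC', 'LC': 'DC', 'LCC': 'DCC',
--              'RC': 'UC', 'RCC': 'UCC', 'FC': 'FC',
--              'FCC': 'FCC', 'BC': 'BC', 'BCC': 'BCC',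
--              'XC': 'YC', 'XCC': 'YCC', 'YC': 'XCC',
--              'YCC': 'XC', 'ZC': 'ZC', 'ZCC': 'ZCC'
--              }
--
--     dicZCC = {'UC': 'RC', 'UCC': 'RCC', 'DC': 'LC',
--               'DCC': 'LCC', 'LC': 'UC', 'LCC': 'UCC',
--               'RC': 'DC', 'RCC': 'DCC', 'FC': 'FC',
--               'FCC': 'FCC', 'BC': 'BC', 'BCC': 'BCC',
--               'XC': 'YCC', 'XCC': 'YC', 'YC': 'XC',
--               'YCC': 'XCC', 'ZC': 'ZC', 'ZCC': 'ZCC'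
--               }
--
--     hisCopy = copy.deepcopy(history)
--     size = len(hisCopy)
--     for i in range(size):			# upon finding a cube rotation, every move
--         if hisCopy[i] == 'XC':		# or rotation afterwards is transcribed
--             for x in range(i+1, size):
--                 hisCopy[x] = dicXC[hisCopy[x]]
--         elif hisCopy[i] == 'XCC':
--             for x in range(i+1, size):
--                 hisCopy[x] = dicXCC[hisCopy[x]]
--         elif hisCopy[i] == 'YC':
--             for x in range(i+1, size):
--                 hisCopy[x] = dicYC[hisCopy[x]]
--         elif hisCopy[i] == 'YCC':
--             for x in range(i+1, size):
--                 hisCopy[x] = dicYCC[hisCopy[x]]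
--         elif hisCopy[i] == 'ZC':
--             for x in range(i+1, size):
--                 hisCopy[x] = dicZC[hisCopy[x]]
--         elif hisCopy[i] == 'ZCC':
--             for x in range(i+1, size):
--                 hisCopy[x] = dicZCC[hisCopy[x]]
--
--     undesireables = ['XC', 'XCC', 'YC', 'YCC', 'ZC', 'ZCC']
--     movesOnly = []
--     for i in hisCopy:				# write every move in hisCopy to movesOnly except for cube rotations,
--         if i in undesireables:		# thereby making a list of absolute moves only
--             pass
--         else:
--             movesOnly.append(i)
--     return movesOnly
-- ===== SOURCE B (Python) =====
-- # Single pass over the history keeping only the cube ORIENTATION as a 6-face map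
-- # (relative face -> absolute face), composed with a 4-cycle per rotation, instead
-- # of A's rewriting of the whole remaining suffix through an 18-token table at
-- # every rotation (A is O(n^2); this is O(n)).
--
-- _FACES = 'UDLRFB'
--
-- # the 4-cycle of faces each relative cube rotation performs (fixed faces omitted)
-- _CYC = {'XC':  {'U': 'F', 'F': 'D', 'D': 'B', 'B': 'U'},
--         'XCC': {'U': 'B', 'B': 'D', 'D': 'F', 'F': 'U'},
--         'YC':  {'L': 'F', 'F': 'R', 'R': 'B', 'B': 'L'},
--         'YCC': {'L': 'B', 'B': 'R', 'R': 'F', 'F': 'L'},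
--         'ZC':  {'U': 'L', 'L': 'D', 'D': 'R', 'R': 'U'},
--         'ZCC': {'U': 'R', 'R': 'D', 'D': 'L', 'L': 'U'}}
--
--
-- def RealMovesOnly(history):
--     sigma = {f: f for f in _FACES}      # relative face -> absolute face
--     movesOnly = []
--     for m in history:
--         if m in _CYC:
--             cyc = _CYC[m]
--             sigma = {f: sigma[cyc.get(f, f)] for f in sigma}
--         elif m[:1] in sigma and m[1:] in ('C', 'CC'):
--             movesOnly.append(sigma[m[:1]] + m[1:])
--         else:
--             movesOnly.append(m)
--     return movesOnly
-- ===== Notes on version B (the rewrite author's own statement) =====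
-- stated objective: faster
-- what changed: Instead of rewriting the whole remaining history through an 18-token dictionary at every cube rotation (nested loops), B makes a single pass keeping only the cube orientation as a 6-entry face map, composes it with the rotation's face 4-cycle in O(1) per rotation, and translates each face move's letter through it once.
import Mathlib
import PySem

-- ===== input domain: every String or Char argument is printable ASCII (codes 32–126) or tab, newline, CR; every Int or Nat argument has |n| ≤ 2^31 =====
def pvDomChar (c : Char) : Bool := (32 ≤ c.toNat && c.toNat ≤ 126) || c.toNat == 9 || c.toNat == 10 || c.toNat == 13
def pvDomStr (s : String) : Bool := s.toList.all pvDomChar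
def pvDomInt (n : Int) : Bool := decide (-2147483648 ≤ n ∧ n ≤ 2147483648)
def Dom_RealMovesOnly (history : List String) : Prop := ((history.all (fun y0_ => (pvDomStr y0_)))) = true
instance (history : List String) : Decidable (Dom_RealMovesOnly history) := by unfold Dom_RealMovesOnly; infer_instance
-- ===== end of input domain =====

-- B replaces A's suffix rewriting through 18-token tables at every cube rotation
-- (nested loops) by a single pass that keeps only the cube orientation as a
-- 6-face map composed with a 4-cycle per rotation (objective: faster).

-- ===== PORT A =====
def pvROT : List String := ["XC","XCC","YC","YCC","ZC","ZCC"]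

def pvDicXC : PySem.Dict String String := PySem.Dict.mk
  [("UC","FC"),("UCC","FCC"),("DC","BC"),("DCC","BCC"),("LC","LC"),("LCC","LCC"),
   ("RC","RC"),("RCC","RCC"),("FC","DC"),("FCC","DCC"),("BC","UC"),("BCC","UCC"),
   ("XC","XC"),("XCC","XCC"),("YC","ZC"),("YCC","ZCC"),("ZC","YCC"),("ZCC","YC")]

def pvDicXCC : PySem.Dict String String := PySem.Dict.mk
  [("UC","BC"),("UCC","BCC"),("DC","FC"),("DCC","FCC"),("LC","LC"),("LCC","LCC"),
   ("RC","RC"),("RCC","RCC"),("FC","UC"),("FCC","UCC"),("BC","DC"),("BCC","DCC"),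
   ("XC","XC"),("XCC","XCC"),("YC","ZCC"),("YCC","ZC"),("ZC","YC"),("ZCC","YCC")]

def pvDicYC : PySem.Dict String String := PySem.Dict.mk
  [("UC","UC"),("UCC","UCC"),("DC","DC"),("DCC","DCC"),("LC","FC"),("LCC","FCC"),
   ("RC","BC"),("RCC","BCC"),("FC","RC"),("FCC","RCC"),("BC","LC"),("BCC","LCC"),
   ("XC","ZCC"),("XCC","ZC"),("YC","YC"),("YCC","YCC"),("ZC","XC"),("ZCC","XCC")]

def pvDicYCC : PySem.Dict String String := PySem.Dict.mk
  [("UC","UC"),("UCC","UCC"),("DC","DC"),("DCC","DCC"),("LC","BC"),("LCC","BCC"),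
   ("RC","FC"),("RCC","FCC"),("FC","LC"),("FCC","LCC"),("BC","RC"),("BCC","RCC"),
   ("XC","ZC"),("XCC","ZCC"),("YC","YC"),("YCC","YCC"),("ZC","XCC"),("ZCC","XC")]

def pvDicZC : PySem.Dict String String := PySem.Dict.mk
  [("UC","LC"),("UCC","LCC"),("DC","RC"),("DCC","RCC"),("LC","DC"),("LCC","DCC"),
   ("RC","UC"),("RCC","UCC"),("FC","FC"),("FCC","FCC"),("BC","BC"),("BCC","BCC"),
   ("XC","YC"),("XCC","YCC"),("YC","XCC"),("YCC","XC"),("ZC","ZC"),("ZCC","ZCC")]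

def pvDicZCC : PySem.Dict String String := PySem.Dict.mk
  [("UC","RC"),("UCC","RCC"),("DC","LC"),("DCC","LCC"),("LC","UC"),("LCC","UCC"),
   ("RC","DC"),("RCC","DCC"),("FC","FC"),("FCC","FCC"),("BC","BC"),("BCC","BCC"),
   ("XC","YCC"),("XCC","YC"),("YC","XC"),("YCC","XCC"),("ZC","ZC"),("ZCC","ZCC")]

-- A's outer index loop: at each position, if the (already transcribed) entry is a
-- cube rotation, rewrite the whole remaining suffix through the matching table.
-- (A's dict lookup dic[x] raises KeyError on a missing key; here getD x x — those
-- inputs are excluded by Pre_RealMovesOnly.)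
def pvTranscribe : List String → List String
  | [] => []
  | h :: t =>
    h :: pvTranscribe
      (if h == "XC" then t.map (fun m => pvDicXC.getD m m)
       else if h == "XCC" then t.map (fun m => pvDicXCC.getD m m)
       else if h == "YC" then t.map (fun m => pvDicYC.getD m m)
       else if h == "YCC" then t.map (fun m => pvDicYCC.getD m m)
       else if h == "ZC" then t.map (fun m => pvDicZC.getD m m)
       else if h == "ZCC" then t.map (fun m => pvDicZCC.getD m m)
       else t)
  termination_by l => l.length
  decreasing_by split_ifs <;> simp [List.length_map]

def RealMovesOnly (history : List String) : List String :=
  let hisCopy := pvTranscribe history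
  -- final loop: copy everything except the cube rotations ('undesireables')
  hisCopy.foldl (fun movesOnly i => if pvROT.contains i then movesOnly else movesOnly ++ [i]) []

-- ===== PORT B =====
def pvFACES : List Char := ['U','D','L','R','F','B']

-- _CYC in Source B: the 4-cycle of faces each cube rotation performs
def pvCyc (s : String) : PySem.Dict Char Char :=
  if s == "XC" then PySem.Dict.mk [('U','F'),('F','D'),('D','B'),('B','U')]
  else if s == "XCC" then PySem.Dict.mk [('U','B'),('B','D'),('D','F'),('F','U')]
  else if s == "YC" then PySem.Dict.mk [('L','F'),('F','R'),('R','B'),('B','L')]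
  else if s == "YCC" then PySem.Dict.mk [('L','B'),('B','R'),('R','F'),('F','L')]
  else if s == "ZC" then PySem.Dict.mk [('U','L'),('L','D'),('D','R'),('R','U')]
  else PySem.Dict.mk [('U','R'),('R','D'),('D','L'),('L','U')]

-- B's loop body: on a rotation compose sigma with its face 4-cycle; on a face
-- move translate its face letter through sigma; anything else passes through.
-- (strings handled at the List Char level: m[:1] is the head char, m[1:] the tail)
def pvStepB (st : PySem.Dict Char Char × List String) (m : String) :
    PySem.Dict Char Char × List String :=
  if pvROT.contains m then
    (PySem.Dict.mk (st.1.items.map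
        (fun p => (p.1, st.1.getD ((pvCyc m).getD p.1 p.1) ((pvCyc m).getD p.1 p.1)))), st.2)
  else
    match m.toList with
    | c :: rest =>
      if st.1.keys.contains c && (rest == ['C'] || rest == ['C','C']) then
        (st.1, st.2 ++ [String.ofList (st.1.getD c c :: rest)])
      else (st.1, st.2 ++ [m])
    | [] => (st.1, st.2 ++ [m])

def RealMovesOnly_alt (history : List String) : List String :=
  let sigma0 : PySem.Dict Char Char := PySem.Dict.mk (pvFACES.map (fun f => (f, f)))
  (history.foldl pvStepB (sigma0, ([] : List String))).2

-- ===== PRECONDITION & SPEC =====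
def pvKEYS : List String :=
  ["UC","UCC","DC","DCC","LC","LCC","RC","RCC","FC","FCC","BC","BCC","XC","XCC","YC","YCC","ZC","ZCC"]

-- Pre_ excludes exactly the inputs on which Python A raises KeyError: a token that is
-- not one of the 18 move/rotation tokens occurring after some cube rotation.
def Pre_RealMovesOnly (history : List String) : Prop :=
  ∀ i : Fin history.length, ∀ j : Fin history.length,
    (i : Nat) < (j : Nat) → history[i] ∈ pvROT → history[j] ∈ pvKEYS

instance (history : List String) : Decidable (Pre_RealMovesOnly history) := by
  unfold Pre_RealMovesOnly; infer_instance

def pvWitness_RealMovesOnly : List String := ["UC", "XC", "FC", "YCC", "RC"]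

def Spec_RealMovesOnly (history : List String) (out : List String) : Prop := out = RealMovesOnly_alt history
instance (history : List String) (out : List String) : Decidable (Spec_RealMovesOnly history out) := by unfold Spec_RealMovesOnly; infer_instance

-- ===== CLAIM (what is proved, stated in full; the proofs are below) =====
def Claim_equal_RealMovesOnly : Prop := ∀ (history : List String), Dom_RealMovesOnly history → Pre_RealMovesOnly history → Spec_RealMovesOnly history (RealMovesOnly history)

-- ===== LEMMAS AND PROOFS =====

-- apply a table (with identity default) to a token
def pvAp (d : PySem.Dict String String) (m : String) : String := d.getD m m

-- A's suffix-rewriting table selection, and its composition with a previous map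
def pvTable (s : String) : PySem.Dict String String :=
  if s == "XC" then pvDicXC
  else if s == "XCC" then pvDicXCC
  else if s == "YC" then pvDicYC
  else if s == "YCC" then pvDicYCC
  else if s == "ZC" then pvDicZC
  else pvDicZCC

def pvCompose (d : PySem.Dict String String) (s : String) : PySem.Dict String String :=
  PySem.Dict.mk (d.items.map (fun p => (p.1, (pvTable s).getD p.2 p.2)))

-- B's sigma update for rotation token r (the expression inside pvStepB)
def pvSigStep (sg : PySem.Dict Char Char) (r : String) : PySem.Dict Char Char :=
  PySem.Dict.mk (sg.items.map
    (fun p => (p.1, sg.getD ((pvCyc r).getD p.1 p.1) ((pvCyc r).getD p.1 p.1))))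

-- the 24 reachable states of the loops, as item lists: A's composed 18-token
-- table paired with B's composed 6-face map (the rotation group of the cube)
def pvR : List ((List (String × String)) × (List (Char × Char))) := [
  ([("UC","UC"),("UCC","UCC"),("DC","DC"),("DCC","DCC"),("LC","LC"),("LCC","LCC"),("RC","RC"),("RCC","RCC"),("FC","FC"),("FCC","FCC"),("BC","BC"),("BCC","BCC"),("XC","XC"),("XCC","XCC"),("YC","YC"),("YCC","YCC"),("ZC","ZC"),("ZCC","ZCC")], [('U','U'),('D','D'),('L','L'),('R','R'),('F','F'),('B','B')]),
  ([("UC","FC"),("UCC","FCC"),("DC","BC"),("DCC","BCC"),("LC","LC"),("LCC","LCC"),("RC","RC"),("RCC","RCC"),("FC","DC"),("FCC","DCC"),("BC","UC"),("BCC","UCC"),("XC","XC"),("XCC","XCC"),("YC","ZC"),("YCC","ZCC"),("ZC","YCC"),("ZCC","YC")], [('U','F'),('D','B'),('L','L'),('R','R'),('F','D'),('B','U')]),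
  ([("UC","BC"),("UCC","BCC"),("DC","FC"),("DCC","FCC"),("LC","LC"),("LCC","LCC"),("RC","RC"),("RCC","RCC"),("FC","UC"),("FCC","UCC"),("BC","DC"),("BCC","DCC"),("XC","XC"),("XCC","XCC"),("YC","ZCC"),("YCC","ZC"),("ZC","YC"),("ZCC","YCC")], [('U','B'),('D','F'),('L','L'),('R','R'),('F','U'),('B','D')]),
  ([("UC","UC"),("UCC","UCC"),("DC","DC"),("DCC","DCC"),("LC","FC"),("LCC","FCC"),("RC","BC"),("RCC","BCC"),("FC","RC"),("FCC","RCC"),("BC","LC"),("BCC","LCC"),("XC","ZCC"),("XCC","ZC"),("YC","YC"),("YCC","YCC"),("ZC","XC"),("ZCC","XCC")], [('U','U'),('D','D'),('L','F'),('R','B'),('F','R'),('B','L')]),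
  ([("UC","UC"),("UCC","UCC"),("DC","DC"),("DCC","DCC"),("LC","BC"),("LCC","BCC"),("RC","FC"),("RCC","FCC"),("FC","LC"),("FCC","LCC"),("BC","RC"),("BCC","RCC"),("XC","ZC"),("XCC","ZCC"),("YC","YC"),("YCC","YCC"),("ZC","XCC"),("ZCC","XC")], [('U','U'),('D','D'),('L','B'),('R','F'),('F','L'),('B','R')]),
  ([("UC","LC"),("UCC","LCC"),("DC","RC"),("DCC","RCC"),("LC","DC"),("LCC","DCC"),("RC","UC"),("RCC","UCC"),("FC","FC"),("FCC","FCC"),("BC","BC"),("BCC","BCC"),("XC","YC"),("XCC","YCC"),("YC","XCC"),("YCC","XC"),("ZC","ZC"),("ZCC","ZCC")], [('U','L'),('D','R'),('L','D'),('R','U'),('F','F'),('B','B')]),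
  ([("UC","RC"),("UCC","RCC"),("DC","LC"),("DCC","LCC"),("LC","UC"),("LCC","UCC"),("RC","DC"),("RCC","DCC"),("FC","FC"),("FCC","FCC"),("BC","BC"),("BCC","BCC"),("XC","YCC"),("XCC","YC"),("YC","XC"),("YCC","XCC"),("ZC","ZC"),("ZCC","ZCC")], [('U','R'),('D','L'),('L','U'),('R','D'),('F','F'),('B','B')]),
  ([("UC","DC"),("UCC","DCC"),("DC","UC"),("DCC","UCC"),("LC","LC"),("LCC","LCC"),("RC","RC"),("RCC","RCC"),("FC","BC"),("FCC","BCC"),("BC","FC"),("BCC","FCC"),("XC","XC"),("XCC","XCC"),("YC","YCC"),("YCC","YC"),("ZC","ZCC"),("ZCC","ZC")], [('U','D'),('D','U'),('L','L'),('R','R'),('F','B'),('B','F')]),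
  ([("UC","FC"),("UCC","FCC"),("DC","BC"),("DCC","BCC"),("LC","DC"),("LCC","DCC"),("RC","UC"),("RCC","UCC"),("FC","RC"),("FCC","RCC"),("BC","LC"),("BCC","LCC"),("XC","YC"),("XCC","YCC"),("YC","ZC"),("YCC","ZCC"),("ZC","XC"),("ZCC","XCC")], [('U','F'),('D','B'),('L','D'),('R','U'),('F','R'),('B','L')]),
  ([("UC","FC"),("UCC","FCC"),("DC","BC"),("DCC","BCC"),("LC","UC"),("LCC","UCC"),("RC","DC"),("RCC","DCC"),("FC","LC"),("FCC","LCC"),("BC","RC"),("BCC","RCC"),("XC","YCC"),("XCC","YC"),("YC","ZC"),("YCC","ZCC"),("ZC","XCC"),("ZCC","XC")], [('U','F'),('D','B'),('L','U'),('R','D'),('F','L'),('B','R')]),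
  ([("UC","LC"),("UCC","LCC"),("DC","RC"),("DCC","RCC"),("LC","BC"),("LCC","BCC"),("RC","FC"),("RCC","FCC"),("FC","DC"),("FCC","DCC"),("BC","UC"),("BCC","UCC"),("XC","ZC"),("XCC","ZCC"),("YC","XCC"),("YCC","XC"),("ZC","YCC"),("ZCC","YC")], [('U','L'),('D','R'),('L','B'),('R','F'),('F','D'),('B','U')]),
  ([("UC","RC"),("UCC","RCC"),("DC","LC"),("DCC","LCC"),("LC","FC"),("LCC","FCC"),("RC","BC"),("RCC","BCC"),("FC","DC"),("FCC","DCC"),("BC","UC"),("BCC","UCC"),("XC","ZCC"),("XCC","ZC"),("YC","XC"),("YCC","XCC"),("ZC","YCC"),("ZCC","YC")], [('U','R'),('D','L'),('L','F'),('R','B'),('F','D'),('B','U')]),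
  ([("UC","BC"),("UCC","BCC"),("DC","FC"),("DCC","FCC"),("LC","UC"),("LCC","UCC"),("RC","DC"),("RCC","DCC"),("FC","RC"),("FCC","RCC"),("BC","LC"),("BCC","LCC"),("XC","YCC"),("XCC","YC"),("YC","ZCC"),("YCC","ZC"),("ZC","XC"),("ZCC","XCC")], [('U','B'),('D','F'),('L','U'),('R','D'),('F','R'),('B','L')]),
  ([("UC","BC"),("UCC","BCC"),("DC","FC"),("DCC","FCC"),("LC","DC"),("LCC","DCC"),("RC","UC"),("RCC","UCC"),("FC","LC"),("FCC","LCC"),("BC","RC"),("BCC","RCC"),("XC","YC"),("XCC","YCC"),("YC","ZCC"),("YCC","ZC"),("ZC","XCC"),("ZCC","XC")], [('U','B'),('D','F'),('L','D'),('R','U'),('F','L'),('B','R')]),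
  ([("UC","LC"),("UCC","LCC"),("DC","RC"),("DCC","RCC"),("LC","FC"),("LCC","FCC"),("RC","BC"),("RCC","BCC"),("FC","UC"),("FCC","UCC"),("BC","DC"),("BCC","DCC"),("XC","ZCC"),("XCC","ZC"),("YC","XCC"),("YCC","XC"),("ZC","YC"),("ZCC","YCC")], [('U','L'),('D','R'),('L','F'),('R','B'),('F','U'),('B','D')]),
  ([("UC","RC"),("UCC","RCC"),("DC","LC"),("DCC","LCC"),("LC","BC"),("LCC","BCC"),("RC","FC"),("RCC","FCC"),("FC","UC"),("FCC","UCC"),("BC","DC"),("BCC","DCC"),("XC","ZC"),("XCC","ZCC"),("YC","XC"),("YCC","XCC"),("ZC","YC"),("ZCC","YCC")], [('U','R'),('D','L'),('L','B'),('R','F'),('F','U'),('B','D')]),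
  ([("UC","UC"),("UCC","UCC"),("DC","DC"),("DCC","DCC"),("LC","RC"),("LCC","RCC"),("RC","LC"),("RCC","LCC"),("FC","BC"),("FCC","BCC"),("BC","FC"),("BCC","FCC"),("XC","XCC"),("XCC","XC"),("YC","YC"),("YCC","YCC"),("ZC","ZCC"),("ZCC","ZC")], [('U','U'),('D','D'),('L','R'),('R','L'),('F','B'),('B','F')]),
  ([("UC","DC"),("UCC","DCC"),("DC","UC"),("DCC","UCC"),("LC","RC"),("LCC","RCC"),("RC","LC"),("RCC","LCC"),("FC","FC"),("FCC","FCC"),("BC","BC"),("BCC","BCC"),("XC","XCC"),("XCC","XC"),("YC","YCC"),("YCC","YC"),("ZC","ZC"),("ZCC","ZCC")], [('U','D'),('D','U'),('L','R'),('R','L'),('F','F'),('B','B')]),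
  ([("UC","DC"),("UCC","DCC"),("DC","UC"),("DCC","UCC"),("LC","BC"),("LCC","BCC"),("RC","FC"),("RCC","FCC"),("FC","RC"),("FCC","RCC"),("BC","LC"),("BCC","LCC"),("XC","ZC"),("XCC","ZCC"),("YC","YCC"),("YCC","YC"),("ZC","XC"),("ZCC","XCC")], [('U','D'),('D','U'),('L','B'),('R','F'),('F','R'),('B','L')]),
  ([("UC","DC"),("UCC","DCC"),("DC","UC"),("DCC","UCC"),("LC","FC"),("LCC","FCC"),("RC","BC"),("RCC","BCC"),("FC","LC"),("FCC","LCC"),("BC","RC"),("BCC","RCC"),("XC","ZCC"),("XCC","ZC"),("YC","YCC"),("YCC","YC"),("ZC","XCC"),("ZCC","XC")], [('U','D'),('D','U'),('L','F'),('R','B'),('F','L'),('B','R')]),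
  ([("UC","LC"),("UCC","LCC"),("DC","RC"),("DCC","RCC"),("LC","UC"),("LCC","UCC"),("RC","DC"),("RCC","DCC"),("FC","BC"),("FCC","BCC"),("BC","FC"),("BCC","FCC"),("XC","YCC"),("XCC","YC"),("YC","XCC"),("YCC","XC"),("ZC","ZCC"),("ZCC","ZC")], [('U','L'),('D','R'),('L','U'),('R','D'),('F','B'),('B','F')]),
  ([("UC","RC"),("UCC","RCC"),("DC","LC"),("DCC","LCC"),("LC","DC"),("LCC","DCC"),("RC","UC"),("RCC","UCC"),("FC","BC"),("FCC","BCC"),("BC","FC"),("BCC","FCC"),("XC","YC"),("XCC","YCC"),("YC","XC"),("YCC","XCC"),("ZC","ZCC"),("ZCC","ZC")], [('U','R'),('D','L'),('L','D'),('R','U'),('F','B'),('B','F')]),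
  ([("UC","FC"),("UCC","FCC"),("DC","BC"),("DCC","BCC"),("LC","RC"),("LCC","RCC"),("RC","LC"),("RCC","LCC"),("FC","UC"),("FCC","UCC"),("BC","DC"),("BCC","DCC"),("XC","XCC"),("XCC","XC"),("YC","ZC"),("YCC","ZCC"),("ZC","YC"),("ZCC","YCC")], [('U','F'),('D','B'),('L','R'),('R','L'),('F','U'),('B','D')]),
  ([("UC","BC"),("UCC","BCC"),("DC","FC"),("DCC","FCC"),("LC","RC"),("LCC","RCC"),("RC","LC"),("RCC","LCC"),("FC","DC"),("FCC","DCC"),("BC","UC"),("BCC","UCC"),("XC","XCC"),("XCC","XC"),("YC","ZCC"),("YCC","ZC"),("ZC","YCC"),("ZCC","YC")], [('U','B'),('D','F'),('L','R'),('R','L'),('F','D'),('B','U')])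
]

lemma pvMk_items {k v : Type} [BEq k] (d : PySem.Dict k v) : PySem.Dict.mk d.items = d := by
  cases d; rfl

-- every pair reached by the loops: keys are exactly the 18 tokens / the 6 faces
set_option maxRecDepth 10000 in
lemma pvR_keys : ∀ pr ∈ pvR,
    (PySem.Dict.mk pr.1).keys = pvKEYS ∧ (PySem.Dict.mk pr.2).keys = pvFACES := by decide

-- the 18-token maps send rotations to rotations and moves to moves
set_option maxRecDepth 10000 in
lemma pvR_rotpres : ∀ pr ∈ pvR, ∀ m ∈ pvKEYS,
    pvROT.contains (pvAp (PySem.Dict.mk pr.1) m) = pvROT.contains m := by decide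

-- one rotation step: A's composed table and B's composed face map stay paired
set_option maxRecDepth 10000 in
lemma pvR_closed : ∀ pr ∈ pvR, ∀ r ∈ pvROT,
    ((pvCompose (PySem.Dict.mk pr.1) (pvAp (PySem.Dict.mk pr.1) r)).items,
     (pvSigStep (PySem.Dict.mk pr.2) r).items) ∈ pvR := by
  intro pr hpr
  simp only [pvR, List.mem_cons, List.not_mem_nil, or_false] at hpr
  rcases hpr with rfl|rfl|rfl|rfl|rfl|rfl|rfl|rfl|rfl|rfl|rfl|rfl|rfl|rfl|rfl|rfl|rfl|rfl|rfl|rfl|rfl|rfl|rfl|rfl <;> decide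

-- on a face move, A's 18-token map and B's 6-face map agree
lemma pvR_move_b : (pvR.all (fun pr => pvFACES.all (fun c => ([['C'],['C','C']]).all (fun rest =>
    pvAp (PySem.Dict.mk pr.1) (String.ofList (c :: rest))
      == String.ofList ((PySem.Dict.mk pr.2).getD c c :: rest))))) = true := by rfl

lemma pvR_move : ∀ pr ∈ pvR, ∀ c ∈ pvFACES, ∀ rest ∈ [[ 'C' ], ['C','C']],
    pvAp (PySem.Dict.mk pr.1) (String.ofList (c :: rest))
      = String.ofList ((PySem.Dict.mk pr.2).getD c c :: rest) := by
  intro pr hpr c hc rest hr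
  have h1 := List.all_eq_true.mp pvR_move_b pr hpr
  have h2 := List.all_eq_true.mp (List.all_eq_true.mp h1 c hc) rest hr
  simpa using h2

lemma pvROT_sub : ∀ r ∈ pvROT, r ∈ pvKEYS := by decide

lemma pvMoves_mem_b : (pvFACES.all (fun c => ([['C'],['C','C']]).all (fun rest =>
    pvKEYS.contains (String.ofList (c :: rest))))) = true := by rfl

lemma pvMoves_mem : ∀ c ∈ pvFACES, ∀ rest ∈ [[ 'C' ], ['C','C']],
    String.ofList (c :: rest) ∈ pvKEYS := by
  intro c hc rest hr
  have := List.all_eq_true.mp (List.all_eq_true.mp pvMoves_mem_b c hc) rest hr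
  simpa using this

-- every 18-token key is a rotation or face-letter + 'C'/'CC'
set_option maxRecDepth 10000 in
lemma pvKEYS_shape : ∀ m ∈ pvKEYS, (pvROT.contains m
    || (match m.toList with
        | c :: rest => pvFACES.contains c && (rest == ['C'] || rest == ['C','C'])
        | [] => false)) = true := by decide

lemma pvGet?_map_items (d : PySem.Dict String String) (f : String → String) (k : String) :
    (PySem.Dict.mk (d.items.map (fun p => (p.1, f p.2)))).get? k
      = (d.get? k).map f := by
  obtain ⟨l⟩ := d
  induction l with
  | nil => simp [PySem.Dict.get?]
  | cons p rest ih =>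
    obtain ⟨a, b⟩ := p
    simp only [List.map_cons]
    rw [PySem.Dict.get?_mk_cons, PySem.Dict.get?_mk_cons]
    by_cases h : a == k
    · simp [h]
    · simp only [h, Bool.false_eq_true, ite_false]
      exact ih

-- a token outside the 18 keys is fixed by every table with keys pvKEYS
lemma pvAp_of_not_mem {d : PySem.Dict String String} (hk : d.keys = pvKEYS)
    {m : String} (hm : m ∉ pvKEYS) : pvAp d m = m := by
  have hnone : d.get? m = none := by
    rw [PySem.Dict.get?_eq_none_iff_not_mem_keys, hk]; exact hm
  simp [pvAp, PySem.Dict.getD_eq_get?_getD, hnone]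

lemma pvKeys_table {s : String} (hs : s ∈ pvROT) : (pvTable s).keys = pvKEYS := by
  fin_cases hs <;> decide

-- looking up in the composed dict = table ∘ old map
lemma pvAp_compose {d : PySem.Dict String String} (hk : d.keys = pvKEYS)
    {s : String} (hs : s ∈ pvROT) (m : String) :
    pvAp (pvCompose d s) m = pvAp (pvTable s) (pvAp d m) := by
  have hrw := pvGet?_map_items d (fun v => (pvTable s).getD v v) m
  cases hget : d.get? m with
  | some v =>
    have hv : d.getD m m = v := by simp [PySem.Dict.getD_eq_get?_getD, hget]
    simp only [pvAp, pvCompose, hv]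
    rw [PySem.Dict.getD_eq_get?_getD, hrw, hget]
    simp
  | none =>
    have hm : m ∉ pvKEYS := by
      rw [← hk, ← PySem.Dict.get?_eq_none_iff_not_mem_keys]; exact hget
    have hv : d.getD m m = m := by simp [PySem.Dict.getD_eq_get?_getD, hget]
    have hfix := pvAp_of_not_mem (pvKeys_table hs) hm
    simp only [pvAp, pvCompose, hv]
    rw [PySem.Dict.getD_eq_get?_getD, hrw, hget]
    rw [show (pvTable s).getD m m = pvAp (pvTable s) m from rfl, hfix]
    simp

-- A's final filtering loop, in closed form
lemma pvFilter_loop (l acc : List String) :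
    l.foldl (fun movesOnly i => if pvROT.contains i then movesOnly else movesOnly ++ [i]) acc
      = acc ++ l.filter (fun i => !pvROT.contains i) := by
  induction l generalizing acc with
  | nil => simp
  | cons h t ih =>
    simp only [List.foldl_cons]
    by_cases hh : pvROT.contains h = true
    · rw [if_pos hh, ih, List.filter_cons_of_neg (by simpa using hh)]
    · rw [if_neg hh, ih, List.filter_cons_of_pos (by simp_all), List.append_assoc]
      rfl

-- A's transcribe at a non-rotation head leaves the head and the tail alone
lemma pvTranscribe_cons_notrot {s : String} (hs : pvROT.contains s = false) (t : List String) :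
    pvTranscribe (s :: t) = s :: pvTranscribe t := by
  rw [pvTranscribe]
  simp [pvROT] at hs
  obtain ⟨h1, h2, h3, h4, h5, h6⟩ := hs
  simp [h1, h2, h3, h4, h5, h6]

-- A's transcribe at a rotation head rewrites the tail through the matching table
lemma pvTranscribe_cons_rot {s : String} (hs : s ∈ pvROT) (t : List String) :
    pvTranscribe (s :: t) = s :: pvTranscribe (t.map (pvAp (pvTable s))) := by
  fin_cases hs <;> · rw [pvTranscribe]; simp only [pvTable]; norm_num; rfl

-- main invariant: B's fold over l with paired state (d, sg) equals A's
-- transcribe-then-filter of l already rewritten through d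
lemma pvMain (l : List String) (d : PySem.Dict String String) (sg : PySem.Dict Char Char)
    (out : List String) (h : (d.items, sg.items) ∈ pvR) :
    (l.foldl pvStepB (sg, out)).2
      = out ++ (pvTranscribe (l.map (pvAp d))).filter (fun i => !pvROT.contains i) := by
  induction l generalizing d sg out with
  | nil => simp [pvTranscribe]
  | cons m t ih =>
    have hkd : d.keys = pvKEYS := by
      have := (pvR_keys _ h).1; rwa [pvMk_items] at this
    have hks : sg.keys = pvFACES := by
      have := (pvR_keys _ h).2; rwa [pvMk_items] at this
    simp only [List.foldl_cons, List.map_cons]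
    by_cases hrot : pvROT.contains m = true
    · -- rotation token
      have hmK : m ∈ pvKEYS := pvROT_sub m (by simpa using hrot)
      have hsrot : pvROT.contains (pvAp d m) = true := by
        have := pvR_rotpres _ h m hmK; rw [pvMk_items] at this; rw [this]; exact hrot
      have hstep : pvStepB (sg, out) m = (pvSigStep sg m, out) := by
        simp only [pvStepB, hrot, if_true]; rfl
      have hcl := pvR_closed _ h m (by simpa using hrot)
      rw [pvMk_items, pvMk_items] at hcl
      rw [hstep, ih _ _ _ hcl]
      rw [pvTranscribe_cons_rot (by simpa using hsrot)]
      rw [List.filter_cons_of_neg (by simpa using hsrot)]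
      rw [List.map_map]
      have hmaps : t.map (pvAp (pvCompose d (pvAp d m)))
          = t.map (pvAp (pvTable (pvAp d m)) ∘ pvAp d) :=
        List.map_congr_left (fun a _ => pvAp_compose hkd (by simpa using hsrot) a)
      rw [hmaps]
    · -- not a rotation token
      have hrotf : pvROT.contains m = false := eq_false_of_ne_true hrot
      cases hm : m.toList with
      | nil =>
        have hmK : m ∉ pvKEYS := by
          intro hmem
          have hsh := pvKEYS_shape m hmem
          rw [hm] at hsh
          simp at hsh
          exact hrot (by simpa using hsh)
        have hfix : pvAp d m = m := pvAp_of_not_mem hkd hmK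
        have hstep : pvStepB (sg, out) m = (sg, out ++ [m]) := by
          have hnm : m ∉ pvROT := by simpa using hrotf
          simp [pvStepB, hm, hnm]
        rw [hstep, ih _ _ _ h, hfix, pvTranscribe_cons_notrot hrotf]
        rw [List.filter_cons_of_pos (by simpa using hrotf)]
        simp
      | cons c rest =>
        have hmk : String.ofList (c :: rest) = m := by rw [← hm]; exact String.ofList_toList
        by_cases hcond : (pvFACES.contains c && (rest == ['C'] || rest == ['C','C'])) = true
        · -- a face move: translate through sg / through d
          have hcond' := hcond
          rw [Bool.and_eq_true] at hcond'
          have hc : c ∈ pvFACES := by simpa using hcond'.1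
          have hrest : rest ∈ [[ 'C' ], ['C','C']] := by
            have hr2 := hcond'.2
            rw [Bool.or_eq_true] at hr2
            rcases hr2 with h' | h' <;> simp [eq_of_beq h']
          have hmK : m ∈ pvKEYS := hmk ▸ pvMoves_mem c hc rest hrest
          have hstep : pvStepB (sg, out) m
              = (sg, out ++ [String.ofList (sg.getD c c :: rest)]) := by
            simp only [pvStepB, hrot]
            simp only [Bool.false_eq_true, if_false, hm]
            rw [if_pos (by rw [hks]; exact hcond)]
          rw [hstep, ih _ _ _ h]
          have hval : pvAp d m = String.ofList (sg.getD c c :: rest) := by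
            have := pvR_move _ h c hc rest hrest
            rw [pvMk_items, pvMk_items] at this
            rw [← hmk]; exact this
          have hArot' : pvROT.contains (pvAp d m) = false := by
            have := pvR_rotpres _ h m hmK; rw [pvMk_items] at this; rw [this]; exact hrotf
          rw [hval] at hArot' ⊢
          rw [pvTranscribe_cons_notrot hArot', List.filter_cons_of_pos (by simpa using hArot')]
          simp
        · -- anything else passes through unchanged
          have hmK : m ∉ pvKEYS := by
            intro hmem
            have hsh := pvKEYS_shape m hmem
            rw [hm] at hsh
            simp only [hrot, Bool.false_or] at hsh
            exact absurd hsh hcond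
          have hfix : pvAp d m = m := pvAp_of_not_mem hkd hmK
          have hstep : pvStepB (sg, out) m = (sg, out ++ [m]) := by
            simp only [pvStepB, hrot]
            simp only [Bool.false_eq_true, if_false, hm]
            rw [if_neg (by rw [hks]; exact hcond)]
          rw [hstep, ih _ _ _ h, hfix, pvTranscribe_cons_notrot hrotf]
          rw [List.filter_cons_of_pos (by simpa using hrotf)]
          simp

-- the identity dict acts as the identity
lemma pvAp_id_aux (l : List String) (m : String) :
    (PySem.Dict.mk (l.map (fun k => (k, k)))).getD m m = m := by
  induction l with
  | nil => simp [PySem.Dict.getD_eq_get?_getD, PySem.Dict.get?]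
  | cons k rest ih =>
    rw [PySem.Dict.getD_eq_get?_getD] at *
    simp only [List.map_cons, PySem.Dict.get?_mk_cons]
    by_cases h : k == m
    · simp [eq_of_beq h]
    · simp [h, ih]

-- ===== VERDICT (by name: the statement is the Claim_ definition above) =====
set_option maxRecDepth 10000 in
theorem RealMovesOnly_spec : Claim_equal_RealMovesOnly := by
  intro history _ _
  unfold Spec_RealMovesOnly RealMovesOnly RealMovesOnly_alt
  have hmem : (((PySem.Dict.mk (pvKEYS.map (fun k => (k, k)))) : PySem.Dict String String).items,
      ((PySem.Dict.mk (pvFACES.map (fun f => (f, f)))) : PySem.Dict Char Char).items) ∈ pvR := by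
    decide
  have hmap : history.map (pvAp (PySem.Dict.mk (pvKEYS.map (fun k => (k, k))))) = history := by
    refine (List.map_congr_left (fun a _ => ?_)).trans (List.map_id _)
    exact pvAp_id_aux pvKEYS a
  have hmain := pvMain history _ _ [] hmem
  rw [hmap] at hmain
  rw [pvFilter_loop]
  simp only [List.nil_append] at hmain ⊢
  exact hmain.symm
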